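-- pv_equiv track=rewrite | github.com/TiraminseoCake/3D_OracleAD | src/runners/oraclead_npz_runner_3d_cattn.py | segments_from_labels
-- ===== SOURCE A (Python) =====
-- def segments_from_labels(y):
--     segs=[]; in_seg=False; s=0
--     for i,v in enumerate(y):
--         if v==1 and not in_seg:
--             in_seg=True; s=i
--         elif v==0 and in_seg:
--             in_seg=False; segs.append((s,i-1))
--     if in_seg:
--         segs.append((s,len(y)-1))
--     return segs
-- ===== SOURCE B (Python) =====
-- from itertools import groupby
--
-- def segments_from_labels(y):
--     # Pass 1: forward-fill an active-mask; only 0 or 1 changes the state,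
--     # so values other than 0/1 inherit the state (they never break a run).
--     mask = []
--     active = False
--     for v in y:
--         if v == 1:
--             active = True
--         elif v == 0:
--             active = False
--         mask.append(active)
--     # Pass 2: extract maximal runs of True from the mask.
--     segs = []
--     i = 0
--     for key, grp in groupby(mask):
--         n = len(list(grp))
--         if key:
--             segs.append((i, i + n - 1))
--         i += n
--     return segs
-- ===== Notes on version B (the rewrite author's own statement) =====
-- stated objective: alternative
-- what changed: Replaces the single stateful scan with a two-phase decomposition: forward-fill a boolean active-mask (only 0/1 update the state), then extract maximal True runs with itertools.groupby.
import Mathlib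
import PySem

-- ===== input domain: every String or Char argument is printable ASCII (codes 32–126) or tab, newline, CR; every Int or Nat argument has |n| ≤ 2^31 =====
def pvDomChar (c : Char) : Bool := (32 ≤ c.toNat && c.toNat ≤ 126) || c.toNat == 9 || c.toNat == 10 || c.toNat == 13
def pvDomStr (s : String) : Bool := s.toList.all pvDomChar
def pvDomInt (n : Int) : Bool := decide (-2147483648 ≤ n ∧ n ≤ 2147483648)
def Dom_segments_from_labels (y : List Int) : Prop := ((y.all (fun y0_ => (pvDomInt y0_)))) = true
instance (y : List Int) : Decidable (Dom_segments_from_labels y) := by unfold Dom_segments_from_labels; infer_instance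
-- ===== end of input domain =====

-- B builds a forward-filled active-mask and then extracts maximal True runs (groupby-style),
-- instead of A's single stateful scan; objective: alternative decomposition, same cost.

-- ===== PORT A =====
-- the loop body of A's single scan
def stepA (st : List (Int × Int) × Bool × Int) (p : Int × Int) : List (Int × Int) × Bool × Int :=
  if p.2 == 1 && !st.2.1 then (st.1, true, p.1)
  else if p.2 == 0 && st.2.1 then (st.1 ++ [(st.2.2, p.1 - 1)], false, st.2.2)
  else st

-- the trailing 'if in_seg: segs.append((s, len(y)-1))'
def flushA (n : Int) (st : List (Int × Int) × Bool × Int) : List (Int × Int) :=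
  if st.2.1 then st.1 ++ [(st.2.2, n - 1)] else st.1

def segments_from_labels (y : List Int) : List (Int × Int) :=
  flushA (y.length : Int) ((PySem.List.enumerate y).foldl stepA ([], false, 0))

-- ===== PORT B =====
-- pass 1 loop body: forward-fill; only 0/1 change the state
def maskStep (st : List Bool × Bool) (v : Int) : List Bool × Bool :=
  let a := if v == 1 then true else if v == 0 then false else st.2
  (st.1 ++ [a], a)

-- pass 2: the groupby loop — each maximal run of equal values is one group
def extractRuns : List Bool → Int → List (Int × Int)
  | [], _ => []
  | b :: rest, i =>
    let n : Int := 1 + ((rest.takeWhile (fun x => x == b)).length : Int)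
    (if b then [(i, i + n - 1)] else []) ++
      extractRuns (rest.dropWhile (fun x => x == b)) (i + n)
termination_by m _ => m.length
decreasing_by
  have := List.length_dropWhile_le (fun x => x == b) rest
  simp only [List.length_cons]; omega

def segments_from_labels_alt (y : List Int) : List (Int × Int) :=
  extractRuns (y.foldl maskStep ([], false)).1 0

-- ===== PRECONDITION & SPEC =====
def Spec_segments_from_labels (y : List Int) (out : List (Int × Int)) : Prop := out = segments_from_labels_alt y
instance (y : List Int) (out : List (Int × Int)) : Decidable (Spec_segments_from_labels y out) := by unfold Spec_segments_from_labels; infer_instance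

-- ===== CLAIM (what is proved, stated in full; the proofs are below) =====
def Claim_equal_segments_from_labels : Prop := ∀ (y : List Int), Dom_segments_from_labels y → Spec_segments_from_labels y (segments_from_labels y)

-- ===== LEMMAS AND PROOFS =====

-- A's scan written as structural recursion (proof-side model of the foldl)
def loopA : List Int → Int → Bool → Int → List (Int × Int)
  | [], i, inseg, s => if inseg then [(s, i - 1)] else []
  | v :: r, i, inseg, s =>
    if v == 1 && !inseg then loopA r (i + 1) true i
    else if v == 0 && inseg then (s, i - 1) :: loopA r (i + 1) false s
    else loopA r (i + 1) inseg s

-- B's pass 1 written as structural recursion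
def maskFrom (a : Bool) : List Int → List Bool
  | [] => []
  | v :: r =>
    let a' := if v == 1 then true else if v == 0 then false else a
    a' :: maskFrom a' r

-- replace the start of the run open at index i (if any) by s; else close (s, i-1)
def closeOpen (s i : Int) : List (Int × Int) → List (Int × Int)
  | (a, e) :: r => if a = i then (s, e) :: r else (s, i - 1) :: (a, e) :: r
  | [] => [(s, i - 1)]

def wrap : Bool → Int → Int → List (Int × Int) → List (Int × Int)
  | false, _, _, l => l
  | true, s, i, l => closeOpen s i l

theorem bridgeMask (y : List Int) : ∀ (acc : List Bool) (a : Bool),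
    (y.foldl maskStep (acc, a)).1 = acc ++ maskFrom a y := by
  induction y with
  | nil => intro acc a; simp [maskFrom]
  | cons v r ih =>
    intro acc a
    simp only [List.foldl_cons, maskStep, maskFrom, ih]
    simp

theorem bridgeA (y : List Int) : ∀ (j : Int) (segs : List (Int × Int)) (inseg : Bool) (s : Int),
    flushA (j + (y.length : Int)) ((PySem.List.enumerate y j).foldl stepA (segs, inseg, s))
      = segs ++ loopA y j inseg s := by
  induction y with
  | nil =>
    intro j segs inseg s
    cases inseg <;> simp [PySem.List.enumerate_nil, flushA, loopA]
  | cons v r ih =>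
    intro j segs inseg s
    rw [PySem.List.enumerate_cons]
    simp only [List.foldl_cons, loopA, List.length_cons]
    have harith : j + (((r.length + 1 : Nat)) : Int) = (j + 1) + (r.length : Int) := by
      push_cast; ring
    rw [harith]
    simp only [stepA]
    by_cases h1 : (v == 1 && !inseg) = true
    · rw [if_pos h1, if_pos h1, ih]
    · rw [if_neg h1, if_neg h1]
      by_cases h0 : (v == 0 && inseg) = true
      · rw [if_pos h0, if_pos h0, ih]
        simp
      · rw [if_neg h0, if_neg h0, ih]

theorem extract_ge (m : List Bool) (i : Int) : ∀ p ∈ extractRuns m i, i ≤ p.1 := by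
  induction m, i using extractRuns.induct with
  | case1 i => simp [extractRuns]
  | case2 b rest i n ih =>
    intro p hp
    rw [extractRuns] at hp
    have hn : (1 : Int) ≤ n := by simp [n]
    rcases List.mem_append.1 hp with h | h
    · cases b <;> simp_all
    · have := ih p h; omega

-- a leading False is invisible to run extraction
theorem extract_false_cons (m : List Bool) (i : Int) :
    extractRuns (false :: m) i = extractRuns m (i + 1) := by
  cases m with
  | nil => simp [extractRuns]
  | cons c m' =>
    cases c with
    | false =>
      rw [extractRuns, extractRuns]
      simp [List.takeWhile, List.dropWhile]
      congr 1
      omega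
    | true =>
      rw [extractRuns]
      simp [List.takeWhile, List.dropWhile]

theorem extract_true_cons (m : List Bool) (i : Int) :
    extractRuns (true :: m) i
      = (i, i + ((m.takeWhile (fun x => x == true)).length : Int)) ::
        extractRuns (m.dropWhile (fun x => x == true)) (i + 1 + ((m.takeWhile (fun x => x == true)).length : Int)) := by
  rw [extractRuns]
  simp
  refine ⟨by ring, ?_⟩
  congr 1
  omega

theorem closeOpen_far (s i : Int) (l : List (Int × Int)) (h : ∀ p ∈ l, i + 1 ≤ p.1) :
    closeOpen s i l = (s, i - 1) :: l := by
  cases l with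
  | nil => rfl
  | cons p r =>
    obtain ⟨a, e⟩ := p
    have := h (a, e) (List.mem_cons_self ..)
    simp at this
    rw [closeOpen, if_neg (by omega)]

theorem step_lemma (m : List Bool) (i s : Int) :
    closeOpen s i (extractRuns (true :: m) i) = closeOpen s (i + 1) (extractRuns m (i + 1)) := by
  cases m with
  | nil => simp [extractRuns, closeOpen]
  | cons c m' =>
    cases c with
    | true =>
      rw [extract_true_cons, extract_true_cons]
      simp only [closeOpen]
      simp [List.takeWhile, List.dropWhile]
      refine ⟨by ring, ?_⟩
      congr 1
      omega
    | false =>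
      rw [extract_true_cons]
      have hge := extract_ge m' (i + 1 + 1)
      rw [closeOpen_far s (i + 1) _ (by
        rw [extract_false_cons]
        intro p hp
        have := hge p hp
        omega)]
      simp [List.takeWhile, List.dropWhile, closeOpen]

theorem main_lemma (y : List Int) : ∀ (i s : Int) (a : Bool),
    loopA y i a s = wrap a s i (extractRuns (maskFrom a y) i) := by
  induction y with
  | nil =>
    intro i s a
    cases a <;> simp [loopA, maskFrom, extractRuns, wrap, closeOpen]
  | cons v r ih =>
    intro i s a
    by_cases h1 : v = 1
    · subst h1
      cases a with
      | false =>
        simp only [loopA, maskFrom, wrap]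
        norm_num
        rw [ih (i + 1) i true]
        simp only [wrap]
        rw [← step_lemma]
        rw [extract_true_cons]
        simp [closeOpen]
      | true =>
        simp only [loopA, maskFrom, wrap]
        norm_num
        rw [ih (i + 1) s true]
        simp only [wrap]
        rw [← step_lemma]
    · by_cases h0 : v = 0
      · subst h0
        cases a with
        | false =>
          simp only [loopA, maskFrom, wrap]
          norm_num
          rw [ih (i + 1) s false]
          simp only [wrap]
          rw [extract_false_cons]
        | true =>
          simp only [loopA, maskFrom, wrap]
          norm_num
          rw [ih (i + 1) s false]
          simp only [wrap]
          rw [extract_false_cons]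
          have hge := extract_ge (maskFrom false r) (i + 1)
          rw [closeOpen_far s i _ (by intro p hp; exact hge p hp)]
      · cases a with
        | false =>
          simp only [loopA, maskFrom]
          rw [if_neg (by simp [h1]), if_neg (by simp)]
          simp only [if_neg (by simp [h1] : ¬ ((v == 1) = true)), if_neg (by simp [h0] : ¬ ((v == 0) = true))]
          simp only [wrap]
          rw [ih (i + 1) s false]
          simp only [wrap]
          rw [extract_false_cons]
        | true =>
          simp only [loopA, maskFrom]
          rw [if_neg (by simp), if_neg (by simp [h0])]
          simp only [if_neg (by simp [h1] : ¬ ((v == 1) = true)), if_neg (by simp [h0] : ¬ ((v == 0) = true))]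
          simp only [wrap]
          rw [ih (i + 1) s true]
          simp only [wrap]
          rw [← step_lemma]

-- ===== VERDICT (by name: the statement is the Claim_ definition above) =====
theorem segments_from_labels_spec : Claim_equal_segments_from_labels := by
  intro y _
  unfold Spec_segments_from_labels segments_from_labels segments_from_labels_alt
  have hA := bridgeA y 0 [] false 0
  rw [zero_add] at hA
  rw [hA, bridgeMask y [] false]
  simp only [List.nil_append]
  rw [main_lemma y 0 0 false]
  simp [wrap]
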